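-- pv_equiv track=rewrite | github.com/arauzo/ppcproject | simAnnealing.py | resources_per_activities
-- ===== SOURCE A (Python) =====
-- def resources_per_activities(initialAsignation, resources):
--     """
--     Create a dictionary with the resources
--           the activities need
--
--     Parameters: initialAsignation (list of the activities and the resources they need)
--                 resources
--
--     Returned value: asignation
--     """
--
--     asignation={}
--     #Create a dictionary with the activities and the resources they need
--     for act,resource,amount in initialAsignation:
--         if resource in resources.keys():
--             if act in asignation.keys():
--                 asignation[act] = asignation[act] + [(resource,amount)]
--             else:
--                 asignation[act] = [(resource,amount)]
--
--     return asignation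
-- ===== SOURCE B (Python) =====
-- def resources_per_activities(initialAsignation, resources):
--     # First collect the ordered distinct activities that use a known resource,
--     # then build each activity's pair list by a scan of the input per activity.
--     acts = list(dict.fromkeys(
--         act for act, resource, amount in initialAsignation
--         if resource in resources))
--     return {a: [(resource, amount)
--                 for act, resource, amount in initialAsignation
--                 if act == a and resource in resources]
--             for a in acts}
-- ===== Notes on version B (the rewrite author's own statement) =====
-- stated objective: alternative
-- what changed: Replaces the single dict-accumulating grouping pass with a compute-distinct-keys step followed by a per-activity rescan of the input (comprehension), trading the mutable accumulator for two declarative passes.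
import Mathlib
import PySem

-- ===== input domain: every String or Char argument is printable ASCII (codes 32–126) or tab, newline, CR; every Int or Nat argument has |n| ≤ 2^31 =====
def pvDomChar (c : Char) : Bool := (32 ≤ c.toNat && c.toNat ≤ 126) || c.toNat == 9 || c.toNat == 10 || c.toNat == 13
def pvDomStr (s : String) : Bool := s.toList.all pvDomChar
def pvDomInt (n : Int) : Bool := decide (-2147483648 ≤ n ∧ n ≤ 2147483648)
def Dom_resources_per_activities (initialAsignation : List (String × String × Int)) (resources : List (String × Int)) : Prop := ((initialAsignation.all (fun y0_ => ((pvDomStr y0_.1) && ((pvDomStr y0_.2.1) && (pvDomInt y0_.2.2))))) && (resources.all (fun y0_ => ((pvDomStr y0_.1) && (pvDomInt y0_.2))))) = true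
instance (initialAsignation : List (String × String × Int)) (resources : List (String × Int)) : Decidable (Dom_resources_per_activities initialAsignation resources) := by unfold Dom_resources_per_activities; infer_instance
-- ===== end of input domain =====

-- B replaces A's single dict-accumulating grouping pass by computing the distinct
-- activities first and rescanning the input per activity (alternative decomposition).


-- ===== PORT A =====
-- A: one pass, growing an insertion-ordered dict of activity ↦ list of (resource, amount)
def resources_per_activities (initialAsignation : List (String × String × Int)) (resources : List (String × Int)) : List (String × List (String × Int)) :=
  (initialAsignation.foldl
    (fun asignation t =>
      if (resources.map Prod.fst).contains t.2.1 then        -- resource in resources.keys()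
        if asignation.contains t.1 then
          asignation.insert t.1 (asignation.getD t.1 [] ++ [(t.2.1, t.2.2)])
        else
          asignation.insert t.1 [(t.2.1, t.2.2)]
      else asignation)
    PySem.Dict.empty).items

-- ===== PORT B =====
-- B: distinct activities with a known resource first, then one rescan per activity
def resources_per_activities_alt (initialAsignation : List (String × String × Int)) (resources : List (String × Int)) : List (String × List (String × Int)) :=
  -- acts = distinct activities with a known resource, in first-occurrence order
  (PySem.Set.ofList ((initialAsignation.filter (fun t => (resources.map Prod.fst).contains t.2.1)).map (·.1))).map (fun a =>
    (a, (initialAsignation.filter (fun t => t.1 == a && (resources.map Prod.fst).contains t.2.1)).map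
          (fun t => (t.2.1, t.2.2))))

-- ===== PRECONDITION & SPEC =====
def Spec_resources_per_activities (initialAsignation : List (String × String × Int)) (resources : List (String × Int)) (out : List (String × List (String × Int))) : Prop := out = resources_per_activities_alt initialAsignation resources
instance (initialAsignation : List (String × String × Int)) (resources : List (String × Int)) (out : List (String × List (String × Int))) : Decidable (Spec_resources_per_activities initialAsignation resources out) := by unfold Spec_resources_per_activities; infer_instance

-- ===== CLAIM (what is proved, stated in full; the proofs are below) =====
def Claim_equal_resources_per_activities : Prop := ∀ (initialAsignation : List (String × String × Int)) (resources : List (String × Int)), Dom_resources_per_activities initialAsignation resources → Spec_resources_per_activities initialAsignation resources (resources_per_activities initialAsignation resources)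

-- ===== LEMMAS AND PROOFS =====

-- A's loop body is exactly 'modify act [] (· ++ [(resource, amount)])' guarded by the membership test
theorem pvStep_eq (asig : PySem.Dict String (List (String × Int))) (t : String × String × Int)
    (known : String × String × Int → Bool) :
    (if known t then
      if asig.contains t.1 then
        asig.insert t.1 (asig.getD t.1 [] ++ [(t.2.1, t.2.2)])
      else asig.insert t.1 [(t.2.1, t.2.2)]
     else asig)
    = (if known t then asig.modify t.1 [] (· ++ [(t.2.1, t.2.2)]) else asig) := by
  by_cases hk : known t
  · simp only [hk, if_pos]
    by_cases hc : asig.contains t.1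
    · simp [PySem.Dict.modify, hc]
    · have h0 : asig.getD t.1 [] = [] :=
        PySem.Dict.getD_of_not_contains asig [] (by simpa using hc)
      simp [PySem.Dict.modify, hc, h0]
  · simp [hk]

-- a fold whose body is guarded by a predicate is a fold over the filtered list
theorem pvFoldl_if_filter {α β : Type} (p : β → Bool) (g : α → β → α) :
    ∀ (l : List β) (a : α),
      l.foldl (fun a b => if p b then g a b else a) a = (l.filter p).foldl g a := by
  intro l
  induction l with
  | nil => intro a; rfl
  | cons x xs ih =>
    intro a
    by_cases h : p x <;> simp [h, ih]

-- ===== VERDICT (by name: the statement is the Claim_ definition above) =====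

theorem resources_per_activities_spec : Claim_equal_resources_per_activities := by
  intro init res _
  unfold Spec_resources_per_activities resources_per_activities resources_per_activities_alt
  set known : String × String × Int → Bool := fun t => (res.map Prod.fst).contains t.2.1 with hknown
  -- rewrite A's loop body as a guarded modify
  have hbody : ∀ (asig : PySem.Dict String (List (String × Int))) (t : String × String × Int),
      (if known t then
        if asig.contains t.1 then
          asig.insert t.1 (asig.getD t.1 [] ++ [(t.2.1, t.2.2)])
        else asig.insert t.1 [(t.2.1, t.2.2)]
       else asig)
      = (if known t then asig.modify t.1 [] (· ++ [(t.2.1, t.2.2)]) else asig) :=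
    fun asig t => pvStep_eq asig t known
  have h1 : (init.foldl
      (fun asignation t =>
        if known t then
          if asignation.contains t.1 then
            asignation.insert t.1 (asignation.getD t.1 [] ++ [(t.2.1, t.2.2)])
          else asignation.insert t.1 [(t.2.1, t.2.2)]
        else asignation) PySem.Dict.empty)
      = (init.filter known).foldl (fun asig t => asig.modify t.1 [] (· ++ [(t.2.1, t.2.2)])) PySem.Dict.empty := by
    rw [funext fun asig => funext fun t => hbody asig t]
    exact pvFoldl_if_filter _ _ init _
  rw [h1]
  set fl := init.filter known with hfl
  -- the grouping dict over fl, as a fold over pairs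
  have hmap : fl.foldl (fun asig t => asig.modify t.1 [] (· ++ [(t.2.1, t.2.2)])) PySem.Dict.empty
      = (fl.map (fun t => (t.1, (t.2.1, t.2.2)))).foldl
          (fun d p => d.modify p.1 [] (· ++ [p.2])) PySem.Dict.empty := by
    rw [List.foldl_map]
  rw [hmap]
  set fl' := fl.map (fun t => (t.1, (t.2.1, t.2.2))) with hfl'
  set D := fl'.foldl (fun d p => d.modify p.1 [] (· ++ [p.2])) PySem.Dict.empty with hD
  have hnd : D.keys.Nodup := by
    rw [hD]
    exact PySem.Dict.nodup_keys_foldl_modify_key fl' Prod.fst [] (fun d p => (· ++ [p.2]))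
      PySem.Dict.empty (by simp)
  have hkeys : D.keys = PySem.Set.ofList (fl.map (·.1)) := by
    rw [hD, PySem.Dict.keys_foldl_modify_key]
    simp [PySem.Dict.keys_empty, PySem.Set.update_nil_left, hfl']
  have hget : ∀ a, D.getD a [] = (fl'.filter (fun p => p.1 == a)).map (·.2) := by
    intro a
    rw [hD, PySem.Dict.getD_foldl_modify_append]
    simp [PySem.Dict.getD_empty]
  rw [PySem.Dict.items_eq_map_keys D hnd [], hkeys]
  -- both sides: map over the same distinct activity list
  apply List.map_congr_left
  intro a _
  refine Prod.ext rfl ?_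
  rw [hget a, hfl', List.filter_map]
  rw [hfl, List.filter_filter]
  simp only [Function.comp]
  congr 1
  rw [show (fun t : String × String × Int => (t.1, t.2.1, t.2.2)) = id from funext fun t => rfl,
      List.map_id]
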